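-- pv_equiv track=rewrite | github.com/bashrc2/epicyon | theme.py | setCSSparam
-- ===== SOURCE A (Python) =====
-- def setCSSparam(css: str, param: str, value: str) -> str:
--     """Sets a CSS parameter to a given value
--     """
--     # is this just a simple string replacement?
--     if ';' in param:
--         return css.replace(param, value)
--     # color replacement
--     if param.startswith('rgba('):
--         return css.replace(param, value)
--     # if the parameter begins with * then don't prepend --
--     onceOnly = False
--     if param.startswith('*'):
--         if param.startswith('**'):
--             onceOnly = True
--             searchStr = param.replace('**', '') + ':'
--         else:
--             searchStr = param.replace('*', '') + ':'
--     else: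
--         searchStr = '--' + param + ':'
--     if searchStr not in css:
--         return css
--     if onceOnly:
--         s = css.split(searchStr, 1)
--     else:
--         s = css.split(searchStr)
--     newcss = ''
--     for sectionStr in s:
--         if not newcss:
--             if sectionStr:
--                 newcss = sectionStr
--             else:
--                 newcss = ' '
--         else:
--             if ';' in sectionStr:
--                 newcss += \
--                     searchStr + ' ' + value + ';' + sectionStr.split(';', 1)[1]
--             else:
--                 newcss += searchStr + ' ' + sectionStr
--     return newcss.strip()
-- ===== SOURCE B (Python) =====
-- def setCSSparam(css: str, param: str, value: str) -> str:
--     """Sets a CSS parameter to a given value (single find-based scan)."""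
--     if ';' in param:
--         return css.replace(param, value)
--     if param.startswith('rgba('):
--         return css.replace(param, value)
--     if param.startswith('**'):
--         onceOnly = True
--         searchStr = param.replace('**', '') + ':'
--     elif param.startswith('*'):
--         onceOnly = False
--         searchStr = param.replace('*', '') + ':'
--     else:
--         onceOnly = False
--         searchStr = '--' + param + ':'
--     i = css.find(searchStr)
--     if i == -1:
--         return css
--     pieces = [css[:i]]
--     pos = i + len(searchStr)
--     while True:
--         nxt = -1 if onceOnly else css.find(searchStr, pos)
--         section = css[pos:] if nxt == -1 else css[pos:nxt]
--         semi = section.find(';')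
--         if semi == -1:
--             pieces.append(searchStr + ' ' + section)
--         else:
--             pieces.append(searchStr + ' ' + value + section[semi:])
--         if nxt == -1:
--             break
--         pos = nxt + len(searchStr)
--     return ''.join(pieces).strip()
-- ===== Notes on version B (the rewrite author's own statement) =====
-- stated objective: alternative
-- what changed: A splits the stylesheet into a list of sections with str.split (twice materialising section lists, plus an inner split(';',1) per section) and re-concatenates them in a stateful fold; B never splits: it walks the string with str.find, emitting the prefix and one rewritten piece per occurrence of the search key in a single scan.
import Mathlib
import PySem

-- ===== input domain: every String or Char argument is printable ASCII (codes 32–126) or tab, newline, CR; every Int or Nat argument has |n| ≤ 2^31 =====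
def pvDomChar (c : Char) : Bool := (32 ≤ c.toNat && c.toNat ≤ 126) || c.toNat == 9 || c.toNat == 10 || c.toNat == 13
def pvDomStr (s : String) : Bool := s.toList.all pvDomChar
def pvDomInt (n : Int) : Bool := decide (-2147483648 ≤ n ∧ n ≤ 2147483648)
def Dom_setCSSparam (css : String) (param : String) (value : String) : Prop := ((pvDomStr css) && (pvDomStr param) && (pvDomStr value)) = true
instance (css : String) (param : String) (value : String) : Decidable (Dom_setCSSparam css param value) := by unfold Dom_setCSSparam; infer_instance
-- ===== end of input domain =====

-- B is an alternative implementation: A splits the css into section lists and re-concatenates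
-- them in a stateful fold; B walks the string with find, emitting one rewritten piece per
-- occurrence in a single scan (same cost, no split lists).

-- shared helper: the guard computation of onceOnly and searchStr (identical lines in A and B)
def cssSearch (paramL : List Char) : Bool × List Char :=
  if PySem.Chars.startswith paramL ['*'] then
    if PySem.Chars.startswith paramL ['*', '*'] then
      (true, PySem.Chars.replace paramL ['*', '*'] [] ++ [':'])
    else
      (false, PySem.Chars.replace paramL ['*'] [] ++ [':'])
  else
    (false, '-' :: '-' :: (paramL ++ [':']))

-- ===== PORT A =====
def setCSSparam (css : String) (param : String) (value : String) : String :=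
  let cssL := css.toList
  let paramL := param.toList
  let valueL := value.toList
  if PySem.Chars.isIn [';'] paramL then String.mk (PySem.Chars.replace cssL paramL valueL)
  else if PySem.Chars.startswith paramL ['r', 'g', 'b', 'a', '('] then
    String.mk (PySem.Chars.replace cssL paramL valueL)
  else
    let os := cssSearch paramL
    let onceOnly := os.1
    let searchStr := os.2
    if PySem.Chars.isIn searchStr cssL = false then css
    else
      let s := if onceOnly then PySem.Chars.splitOnMax cssL searchStr 1
               else PySem.Chars.splitOn cssL searchStr
      let newcss := s.foldl (fun newcss sectionStr =>
        if newcss.isEmpty then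
          (if sectionStr.isEmpty = false then sectionStr else [' '])
        else
          if PySem.Chars.isIn [';'] sectionStr then
            newcss ++ searchStr ++ [' '] ++ valueL ++ [';'] ++
              ((PySem.Chars.splitOnMax sectionStr [';'] 1).getD 1 [])
          else
            newcss ++ searchStr ++ [' '] ++ sectionStr) []
      String.mk (PySem.Chars.strip newcss)

-- ===== PORT B =====
def altPiece (searchStr valueL sec : List Char) : List Char :=
  let semi := PySem.Chars.find sec [';']
  if semi = -1 then searchStr ++ [' '] ++ sec
  else searchStr ++ [' '] ++ valueL ++ sec.drop semi.toNat

def altLoop (searchStr valueL : List Char) (onceOnly : Bool) (rem : List Char) : List Char :=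
  let nxt := if onceOnly then -1 else PySem.Chars.find rem searchStr
  if h : nxt = -1 ∨ searchStr.length = 0 then altPiece searchStr valueL rem
  else
    altPiece searchStr valueL (rem.take nxt.toNat) ++
      altLoop searchStr valueL onceOnly (rem.drop (nxt.toNat + searchStr.length))
termination_by rem.length
decreasing_by
  rw [not_or] at h
  obtain ⟨h1, h2⟩ := h
  have hnx : nxt = PySem.Chars.find rem searchStr := by
    by_cases ho : onceOnly = true
    · exfalso; apply h1; simp [nxt, ho]
    · simp [nxt, Bool.not_eq_true] at ho ⊢; simp [ho]
  have hrem : rem ≠ [] := by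
    intro he
    apply h1
    rw [hnx, he]
    rw [PySem.Chars.find_eq_neg_one_iff]
    intro hinf
    exact h2 (by simpa using List.eq_nil_of_infix_nil hinf ▸ rfl)
  have : 1 ≤ nxt.toNat + searchStr.length := by omega
  simp only [List.length_drop]
  have : 0 < rem.length := List.length_pos_iff.mpr hrem
  omega

def setCSSparam_alt (css : String) (param : String) (value : String) : String :=
  let cssL := css.toList
  let paramL := param.toList
  let valueL := value.toList
  if PySem.Chars.isIn [';'] paramL then String.mk (PySem.Chars.replace cssL paramL valueL)
  else if PySem.Chars.startswith paramL ['r', 'g', 'b', 'a', '('] then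
    String.mk (PySem.Chars.replace cssL paramL valueL)
  else
    let os := cssSearch paramL
    let i := PySem.Chars.find cssL os.2
    if i = -1 then css
    else
      String.mk (PySem.Chars.strip
        (cssL.take i.toNat ++ altLoop os.2 valueL os.1 (cssL.drop (i.toNat + os.2.length))))

-- ===== PRECONDITION & SPEC =====
def Spec_setCSSparam (css : String) (param : String) (value : String) (out : String) : Prop := out = setCSSparam_alt css param value
instance (css : String) (param : String) (value : String) (out : String) : Decidable (Spec_setCSSparam css param value out) := by unfold Spec_setCSSparam; infer_instance

-- ===== CLAIM (what is proved, stated in full; the proofs are below) =====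
def Claim_equal_setCSSparam : Prop := ∀ (css : String) (param : String) (value : String), Dom_setCSSparam css param value → Spec_setCSSparam css param value (setCSSparam css param value)

-- ===== LEMMAS AND PROOFS =====

theorem findgo_shift (sub : List Char) : ∀ (l : List Char) (k : Nat),
    PySem.Chars.find.go sub l k =
      if PySem.Chars.find l sub = -1 then -1 else PySem.Chars.find l sub + k := by
  intro l
  induction l with
  | nil =>
    intro k
    simp only [PySem.Chars.find, PySem.Chars.find.go]
    split <;> simp_all
  | cons c rest ih =>
    intro k
    rw [PySem.Chars.find]
    rw [PySem.Chars.find.go, PySem.Chars.find.go]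
    by_cases hp : sub.isPrefixOf (c :: rest)
    · simp [hp]
    · simp only [hp, if_false, Bool.false_eq_true]
      rw [ih (k+1), ih 1]
      by_cases hf : PySem.Chars.find rest sub = -1
      · simp [hf]
      · have h0 : -1 ≤ PySem.Chars.find rest sub := PySem.Chars.neg_one_le_find rest sub
        have : ¬ (PySem.Chars.find rest sub + (1:Nat) = -1) := by push_cast; omega
        rw [if_neg hf, if_neg hf, if_neg this]
        push_cast
        omega

theorem find_nil (sub : List Char) :
    PySem.Chars.find [] sub = if sub.isEmpty then 0 else -1 := by
  rw [PySem.Chars.find, PySem.Chars.find.go]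
  split <;> simp

theorem find_nil' (sub : List Char) (hsub : sub ≠ []) : PySem.Chars.find [] sub = -1 := by
  rw [find_nil]
  simp [hsub]

theorem find_cons (sub : List Char) (c : Char) (rest : List Char) :
    PySem.Chars.find (c :: rest) sub =
      if sub.isPrefixOf (c :: rest) then 0
      else if PySem.Chars.find rest sub = -1 then -1 else PySem.Chars.find rest sub + 1 := by
  rw [PySem.Chars.find, PySem.Chars.find.go]
  by_cases hp : sub.isPrefixOf (c :: rest)
  · simp [hp]
  · simp only [hp, Bool.false_eq_true, if_false]
    rw [findgo_shift]
    norm_num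

theorem go_nil (sep cur : List Char) (acc : List (List Char)) (f : Nat) :
    PySem.Chars.splitOn.go sep (f+1) [] cur acc = (cur.reverse :: acc).reverse := by
  rw [PySem.Chars.splitOn.go]; omega

theorem go_cons (sep cur : List Char) (acc : List (List Char)) (f : Nat) (c : Char) (rest : List Char) :
    PySem.Chars.splitOn.go sep (f+1) (c :: rest) cur acc =
      if sep.isPrefixOf (c :: rest) then
        PySem.Chars.splitOn.go sep f (List.drop sep.length (c :: rest)) [] (cur.reverse :: acc)
      else PySem.Chars.splitOn.go sep f rest (c :: cur) acc := by
  rw [PySem.Chars.splitOn.go]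

theorem splitOn_go_eq (sep : List Char) (hsep : sep ≠ []) :
    ∀ (fuel : Nat) (l cur : List Char) (acc : List (List Char)), l.length < fuel →
      PySem.Chars.splitOn.go sep fuel l cur acc =
        acc.reverse ++ (PySem.Chars.splitOn l sep).modifyHead (cur.reverse ++ ·) := by
  intro fuel
  induction fuel using Nat.strong_induction_on with
  | _ fuel IH =>
  intro l cur acc hlt
  match fuel, l with
  | 0, l => omega
  | f+1, [] =>
    rw [go_nil, PySem.Chars.splitOn]
    simp only [List.length_nil, Nat.zero_add]
    rw [go_nil]
    simp
  | f+1, c :: rest =>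
    have hs1 : 1 ≤ sep.length := List.length_pos_iff.mpr hsep
    simp only [List.length_cons] at hlt
    rw [go_cons]
    conv_rhs => rw [PySem.Chars.splitOn]
    conv_rhs => rw [show (c :: rest).length + 1 = (rest.length + 1) + 1 by simp]
    rw [go_cons]
    by_cases hp : sep.isPrefixOf (c :: rest)
    · have hple : sep.length ≤ rest.length + 1 := by
        have := List.IsPrefix.length_le (List.isPrefixOf_iff_prefix.mp hp)
        simpa using this
      simp only [hp, if_true]
      rw [IH f (by omega) _ [] (cur.reverse :: acc) (by simp only [List.length_drop, List.length_cons]; omega)]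
      rw [IH (rest.length + 1) (by omega) _ [] ([[].reverse]) (by simp only [List.length_drop, List.length_cons]; omega)]
      simp
    · simp only [hp, Bool.false_eq_true, if_false]
      rw [IH f (by omega) rest (c :: cur) acc (by omega)]
      rw [IH (rest.length + 1) (by omega) rest [c] [] (by omega)]
      simp only [List.reverse_nil, List.nil_append, List.reverse_cons]
      rw [List.modifyHead_modifyHead]
      simp [Function.comp_def]

theorem splitOn_nil (sep : List Char) : PySem.Chars.splitOn [] sep = [[]] := by
  rw [PySem.Chars.splitOn]
  simp only [List.length_nil, Nat.zero_add]
  rw [go_nil]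
  simp

theorem splitOn_prefix (sep l : List Char) (hsep : sep ≠ []) (hl : l ≠ [])
    (hp : sep.isPrefixOf l) :
    PySem.Chars.splitOn l sep = [] :: PySem.Chars.splitOn (l.drop sep.length) sep := by
  match l with
  | [] => exact absurd rfl hl
  | c :: rest =>
    have hs1 : 1 ≤ sep.length := List.length_pos_iff.mpr hsep
    have hple : sep.length ≤ rest.length + 1 := by
      have := List.IsPrefix.length_le (List.isPrefixOf_iff_prefix.mp hp)
      simpa using this
    rw [PySem.Chars.splitOn]
    rw [show (c :: rest).length + 1 = (rest.length + 1) + 1 by simp]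
    rw [go_cons]
    simp only [hp, if_true]
    rw [splitOn_go_eq sep hsep (rest.length + 1) _ [] _ (by simp only [List.length_drop, List.length_cons]; omega)]
    simp only [List.reverse_nil, List.nil_append]
    rw [show (fun x : List Char => x) = id from rfl, List.modifyHead_id]
    simp

theorem splitOn_not_prefix (sep : List Char) (c : Char) (rest : List Char) (hsep : sep ≠ [])
    (hp : ¬ sep.isPrefixOf (c :: rest)) :
    PySem.Chars.splitOn (c :: rest) sep =
      (PySem.Chars.splitOn rest sep).modifyHead (c :: ·) := by
  rw [PySem.Chars.splitOn]
  rw [show (c :: rest).length + 1 = (rest.length + 1) + 1 by simp]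
  rw [go_cons]
  simp only [hp, Bool.false_eq_true, if_false]
  rw [splitOn_go_eq sep hsep (rest.length + 1) rest [c] [] (by omega)]
  simp

theorem splitOn_neg (sep : List Char) (hsep : sep ≠ []) :
    ∀ l, PySem.Chars.find l sep = -1 → PySem.Chars.splitOn l sep = [l] := by
  intro l
  induction l with
  | nil => intro _; exact splitOn_nil sep
  | cons c rest ih =>
    intro hk
    rw [find_cons] at hk
    by_cases hp : sep.isPrefixOf (c :: rest)
    · simp [hp] at hk
    · simp only [hp, Bool.false_eq_true, if_false] at hk
      have hr : PySem.Chars.find rest sep = -1 := by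
        by_cases h : PySem.Chars.find rest sep = -1
        · exact h
        · rw [if_neg h] at hk
          have := PySem.Chars.neg_one_le_find rest sep
          omega
      rw [splitOn_not_prefix sep c rest hsep hp, ih hr]
      simp

theorem splitOn_pos (sep : List Char) (hsep : sep ≠ []) :
    ∀ l, 0 ≤ PySem.Chars.find l sep →
    PySem.Chars.splitOn l sep =
      l.take (PySem.Chars.find l sep).toNat ::
        PySem.Chars.splitOn (l.drop ((PySem.Chars.find l sep).toNat + sep.length)) sep := by
  intro l
  induction l with
  | nil =>
    intro hk
    rw [find_nil' sep hsep] at hk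
    omega
  | cons c rest ih =>
    intro hk
    by_cases hp : sep.isPrefixOf (c :: rest)
    · have hf : PySem.Chars.find (c :: rest) sep = 0 := by rw [find_cons]; simp [hp]
      rw [hf]
      simp only [Int.toNat_zero, List.take_zero, Nat.zero_add]
      exact splitOn_prefix sep (c :: rest) hsep (by simp) hp
    · have hf : PySem.Chars.find (c :: rest) sep =
          if PySem.Chars.find rest sep = -1 then -1 else PySem.Chars.find rest sep + 1 := by
        rw [find_cons]; simp [hp]
      by_cases hr : PySem.Chars.find rest sep = -1
      · rw [hf, if_pos hr] at hk; omega
      · rw [if_neg hr] at hf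
        have hr0 : 0 ≤ PySem.Chars.find rest sep := by
          have := PySem.Chars.neg_one_le_find rest sep; omega
        rw [splitOn_not_prefix sep c rest hsep hp, ih hr0, hf]
        simp only [List.modifyHead_cons]
        congr 1
        · rw [show (PySem.Chars.find rest sep + 1).toNat = (PySem.Chars.find rest sep).toNat + 1 by omega]
          simp
        · congr 1
          rw [show (PySem.Chars.find rest sep + 1).toNat = (PySem.Chars.find rest sep).toNat + 1 by omega]
          simp [Nat.add_right_comm]

theorem maxgo_zero (sep : List Char) (fuel : Nat) (l cur : List Char) (acc : List (List Char)) :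
    PySem.Chars.splitOnMax.go sep fuel 0 l cur acc = ((cur.reverse ++ l) :: acc).reverse := by
  match fuel, l with
  | 0, l => rw [PySem.Chars.splitOnMax.go]
  | f+1, [] => rw [PySem.Chars.splitOnMax.go] <;> simp
  | f+1, c :: rest => rw [PySem.Chars.splitOnMax.go]; simp

theorem maxgo_one (sep : List Char) (hsep : sep ≠ []) :
    ∀ (fuel : Nat) (l cur : List Char) (acc : List (List Char)), l.length < fuel →
      PySem.Chars.splitOnMax.go sep fuel 1 l cur acc =
        if PySem.Chars.find l sep = -1 then acc.reverse ++ [cur.reverse ++ l]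
        else acc.reverse ++ [cur.reverse ++ l.take (PySem.Chars.find l sep).toNat,
          l.drop ((PySem.Chars.find l sep).toNat + sep.length)] := by
  intro fuel
  induction fuel with
  | zero => intro l cur acc h; omega
  | succ f ih =>
    intro l cur acc hlt
    match l with
    | [] =>
      rw [find_nil' sep hsep]
      rw [PySem.Chars.splitOnMax.go]
      · simp
      · omega
    | c :: rest =>
      rw [PySem.Chars.splitOnMax.go]
      simp only [Nat.one_ne_zero, if_false]
      rw [find_cons]
      by_cases hp : sep.isPrefixOf (c :: rest)
      · simp only [hp, if_true]
        rw [maxgo_zero]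
        norm_num
      · simp only [hp, Bool.false_eq_true, if_false]
        simp only [List.length_cons] at hlt
        rw [ih rest (c :: cur) acc (by omega)]
        by_cases hr : PySem.Chars.find rest sep = -1
        · simp [hr]
        · have hr0 : 0 ≤ PySem.Chars.find rest sep := by
            have := PySem.Chars.neg_one_le_find rest sep; omega
          have hne : ¬ (PySem.Chars.find rest sep + 1 = -1) := by omega
          rw [if_neg hr, if_neg hr, if_neg hne]
          rw [show (PySem.Chars.find rest sep + 1).toNat = (PySem.Chars.find rest sep).toNat + 1 by omega]
          simp [Nat.add_right_comm]

theorem splitOnMax_one (sep l : List Char) (hsep : sep ≠ [])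
    (hk : 0 ≤ PySem.Chars.find l sep) :
    PySem.Chars.splitOnMax l sep 1 =
      [l.take (PySem.Chars.find l sep).toNat,
       l.drop ((PySem.Chars.find l sep).toNat + sep.length)] := by
  rw [PySem.Chars.splitOnMax]
  rw [if_neg (by norm_num)]
  rw [show ((1:Int).toNat) = 1 from rfl]
  rw [maxgo_one sep hsep (l.length + 1) l [] [] (by omega)]
  rw [if_neg (by omega)]
  simp

theorem pieceA_eq_altPiece (searchStr valueL sec : List Char) :
    (if PySem.Chars.isIn [';'] sec then
       searchStr ++ [' '] ++ valueL ++ [';'] ++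
         ((PySem.Chars.splitOnMax sec [';'] 1).getD 1 [])
     else searchStr ++ [' '] ++ sec) = altPiece searchStr valueL sec := by
  rw [altPiece]
  by_cases hf : PySem.Chars.find sec [';'] = -1
  · rw [if_neg (by simp [PySem.Chars.isIn, hf]), if_pos hf]
  · have hk : 0 ≤ PySem.Chars.find sec [';'] := by
      have := PySem.Chars.neg_one_le_find sec [';']; omega
    rw [if_pos (by simp [PySem.Chars.isIn, hf]), if_neg hf]
    rw [splitOnMax_one [';'] sec (by simp) hk]
    have hpre : [';'] <+: sec.drop (PySem.Chars.find sec [';']).toNat :=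
      (PySem.Chars.find_spec (s := sec) (sub := [';']) hk).1
    obtain ⟨t, ht⟩ := hpre
    have hdrop : sec.drop ((PySem.Chars.find sec [';']).toNat + 1) = t := by
      have h2 := congrArg (List.drop 1) ht.symm
      simpa [List.drop_drop, Nat.add_comm] using h2
    simp only [List.length_cons, List.length_nil, Nat.zero_add, List.getD_cons_succ, List.getD_cons_zero]
    rw [hdrop, ← ht]
    simp

theorem cssSearch_snd_ne_nil (p : List Char) : (cssSearch p).2 ≠ [] := by
  rw [cssSearch]
  split_ifs <;> simp

theorem strip_space_cons (x : List Char) :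
    PySem.Chars.strip (' ' :: x) = PySem.Chars.strip x := by
  rw [PySem.Chars.strip, PySem.Chars.strip, PySem.Chars.lstrip, PySem.Chars.lstrip]
  rw [List.dropWhile_cons]
  simp [show PySem.Chars.isspace ' ' = true by decide]

theorem foldl_sections (searchStr valueL : List Char) :
    ∀ (secs : List (List Char)) (acc : List Char), acc ≠ [] →
    secs.foldl (fun newcss sectionStr =>
        if newcss.isEmpty then
          (if sectionStr.isEmpty = false then sectionStr else [' '])
        else
          if PySem.Chars.isIn [';'] sectionStr then
            newcss ++ searchStr ++ [' '] ++ valueL ++ [';'] ++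
              ((PySem.Chars.splitOnMax sectionStr [';'] 1).getD 1 [])
          else
            newcss ++ searchStr ++ [' '] ++ sectionStr) acc =
      acc ++ secs.flatMap (altPiece searchStr valueL) := by
  intro secs
  induction secs with
  | nil => intro acc _; simp
  | cons sec rest ih =>
    intro acc hacc
    rw [List.foldl_cons]
    have hne : acc.isEmpty = false := by simpa [List.isEmpty_iff] using hacc
    simp only [hne, Bool.false_eq_true, if_false]
    have hstep : (if PySem.Chars.isIn [';'] sec then
          acc ++ searchStr ++ [' '] ++ valueL ++ [';'] ++
            ((PySem.Chars.splitOnMax sec [';'] 1).getD 1 [])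
        else acc ++ searchStr ++ [' '] ++ sec) = acc ++ altPiece searchStr valueL sec := by
      rw [← pieceA_eq_altPiece]
      split <;> simp [List.append_assoc]
    rw [hstep]
    rw [ih (acc ++ altPiece searchStr valueL sec) (by simp [hacc])]
    simp

theorem altLoop_unfold (searchStr valueL : List Char) (onceOnly : Bool) (rem : List Char) :
    altLoop searchStr valueL onceOnly rem =
      (let nxt := if onceOnly then -1 else PySem.Chars.find rem searchStr
       if nxt = -1 ∨ searchStr.length = 0 then altPiece searchStr valueL rem
       else
         altPiece searchStr valueL (rem.take nxt.toNat) ++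
           altLoop searchStr valueL onceOnly (rem.drop (nxt.toNat + searchStr.length))) := by
  rw [altLoop]
  split <;> simp_all

theorem altLoop_eq_flatMap (searchStr valueL : List Char) (hsep : searchStr ≠ []) :
    ∀ (n : Nat) (rem : List Char), rem.length ≤ n →
      altLoop searchStr valueL false rem =
        (PySem.Chars.splitOn rem searchStr).flatMap (altPiece searchStr valueL) := by
  intro n
  induction n with
  | zero =>
    intro rem hlen
    have hrem : rem = [] := by
      cases rem with
      | nil => rfl
      | cons a b => simp at hlen
    subst hrem
    rw [altLoop_unfold]
    simp only [Bool.false_eq_true, if_false]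
    rw [if_pos (Or.inl (find_nil' searchStr hsep))]
    rw [splitOn_nil]
    simp
  | succ m ih =>
    intro rem hlen
    rw [altLoop_unfold]
    simp only [Bool.false_eq_true, if_false]
    by_cases hf : PySem.Chars.find rem searchStr = -1
    · rw [if_pos (Or.inl hf)]
      rw [splitOn_neg searchStr hsep rem hf]
      simp
    · have hk : 0 ≤ PySem.Chars.find rem searchStr := by
        have := PySem.Chars.neg_one_le_find rem searchStr; omega
      have hs1 : 1 ≤ searchStr.length := List.length_pos_iff.mpr hsep
      rw [if_neg (by push_neg; exact ⟨hf, by omega⟩)]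
      rw [splitOn_pos searchStr hsep rem hk]
      rw [List.flatMap_cons]
      congr 1
      exact ih _ (by simp only [List.length_drop]; omega)

theorem bodyA_eq (sep valueL cssL : List Char) (hsep : sep ≠ [])
    (hk : 0 ≤ PySem.Chars.find cssL sep) (once : Bool) :
    (if once then PySem.Chars.splitOnMax cssL sep 1
     else PySem.Chars.splitOn cssL sep).foldl (fun newcss sectionStr =>
        if newcss.isEmpty then
          (if sectionStr.isEmpty = false then sectionStr else [' '])
        else
          if PySem.Chars.isIn [';'] sectionStr then
            newcss ++ sep ++ [' '] ++ valueL ++ [';'] ++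
              ((PySem.Chars.splitOnMax sectionStr [';'] 1).getD 1 [])
          else
            newcss ++ sep ++ [' '] ++ sectionStr) [] =
      (if (cssL.take (PySem.Chars.find cssL sep).toNat).isEmpty = false
       then cssL.take (PySem.Chars.find cssL sep).toNat else [' ']) ++
        altLoop sep valueL once (cssL.drop ((PySem.Chars.find cssL sep).toNat + sep.length)) := by
  by_cases ho : once
  · rw [if_pos ho]
    rw [splitOnMax_one sep cssL hsep hk]
    rw [List.foldl_cons, List.foldl_cons, List.foldl_nil]
    simp only [List.isEmpty_nil, if_true]
    have hfne : (if (cssL.take (PySem.Chars.find cssL sep).toNat).isEmpty = false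
        then cssL.take (PySem.Chars.find cssL sep).toNat else [' ']).isEmpty = false := by
      split <;> simp_all
    simp only [hfne, Bool.false_eq_true, if_false]
    rw [altLoop_unfold]
    simp only [ho, if_true, if_pos (Or.inl rfl)]
    rw [← pieceA_eq_altPiece sep valueL (cssL.drop ((PySem.Chars.find cssL sep).toNat + sep.length))]
    split <;> simp [List.append_assoc]
  · rw [if_neg ho]
    rw [splitOn_pos sep hsep cssL hk]
    rw [List.foldl_cons]
    simp only [List.isEmpty_nil, if_true]
    have hfne : (if (cssL.take (PySem.Chars.find cssL sep).toNat).isEmpty = false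
        then cssL.take (PySem.Chars.find cssL sep).toNat else [' ']) ≠ [] := by
      split <;> simp_all
    rw [foldl_sections sep valueL _ _ hfne]
    rw [← altLoop_eq_flatMap sep valueL hsep
      (cssL.drop ((PySem.Chars.find cssL sep).toNat + sep.length)).length _ le_rfl]
    simp only [show once = false by simpa using ho]

theorem endgame (k : Nat) (cssL X : List Char) (hcss : cssL ≠ []) (hk : k = 0 ∨ 0 < k) :
    PySem.Chars.strip ((if (cssL.take k).isEmpty = false then cssL.take k else [' ']) ++ X) =
      PySem.Chars.strip (cssL.take k ++ X) := by
  by_cases hk0 : k = 0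
  · rw [hk0]
    simp only [List.take_zero, List.isEmpty_nil, List.nil_append]
    rw [if_neg (by simp)]
    exact strip_space_cons X
  · have htk : cssL.take k ≠ [] := by
      simp [List.take_eq_nil_iff, hcss]
      omega
    rw [if_pos (by simpa [List.isEmpty_iff] using htk)]

-- ===== VERDICT (by name: the statement is the Claim_ definition above) =====
theorem setCSSparam_spec : Claim_equal_setCSSparam := by
  unfold Claim_equal_setCSSparam Spec_setCSSparam
  intro css param value _hdom
  rw [setCSSparam, setCSSparam_alt]
  simp only []
  by_cases h1 : PySem.Chars.isIn [';'] param.toList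
  · simp only [h1, if_true]
  · simp only [h1, Bool.false_eq_true, if_false]
    by_cases h2 : PySem.Chars.startswith param.toList ['r', 'g', 'b', 'a', '(']
    · simp only [h2, if_true]
    · simp only [h2, Bool.false_eq_true, if_false]
      have hsep : (cssSearch param.toList).2 ≠ [] := cssSearch_snd_ne_nil param.toList
      by_cases hf : PySem.Chars.find css.toList (cssSearch param.toList).2 = -1
      · rw [if_pos (by simp [PySem.Chars.isIn, hf]), if_pos hf]
      · have hk : 0 ≤ PySem.Chars.find css.toList (cssSearch param.toList).2 := by
          have := PySem.Chars.neg_one_le_find css.toList (cssSearch param.toList).2; omega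
        rw [if_neg (by simp [PySem.Chars.isIn, hf]), if_neg hf]
        have hcss : css.toList ≠ [] := by
          intro he
          rw [he, find_nil' _ hsep] at hf
          exact hf rfl
        rw [bodyA_eq (cssSearch param.toList).2 value.toList css.toList hsep hk (cssSearch param.toList).1]
        rw [endgame _ css.toList _ hcss (by omega)]
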